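-- pv_equiv track=rewrite | github.com/ricpelo/pro2526 | cuadrado.py | cuadrado
-- ===== SOURCE A (Python) =====
-- def cuadrado(n: int) -> list[list[int]]:
--     """
--     >>> cuadrado(4)
--     [[1, 2, 3, 4], [4, 1, 2, 3], [3, 4, 1, 2], [2, 3, 4, 1]]
--     >>> cuadrado(3)
--     [[1, 2, 3], [3, 1, 2], [2, 3, 1]]
--     >>> cuadrado(2)
--     [[1, 2], [2, 1]]
--     >>> cuadrado(1)
--     [[1]]
--     """
--     def primera(tam: int) -> list[int]:
--         p = []
--         i = 1
--         while i <= tam: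
--             p.append(i)
--             i += 1
--         return p
--     def rotar(lst: list) -> list:
--         return [lst[-1]] + lst[:-1]
--     p = primera(n)
--     res = [p]
--     i = 2
--     while i <= n:
--         p = rotar(p)
--         res.append(p)
--         i += 1
--     return res
-- ===== SOURCE B (Python) =====
-- def cuadrado(n: int) -> list[list[int]]:
--     primera = list(range(1, n + 1))
--     res = [primera]
--     for i in range(2, n + 1):
--         k = n - i + 1
--         res.append(primera[k:] + primera[:k])
--     return res
-- ===== Notes on version B (the rewrite author's own statement) =====
-- stated objective: idiomatic
-- what changed: Each row is built independently by cutting the fixed first row at a closed-form offset (two slices concatenated), instead of repeatedly rotating the previous row as running state.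
import Mathlib
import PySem

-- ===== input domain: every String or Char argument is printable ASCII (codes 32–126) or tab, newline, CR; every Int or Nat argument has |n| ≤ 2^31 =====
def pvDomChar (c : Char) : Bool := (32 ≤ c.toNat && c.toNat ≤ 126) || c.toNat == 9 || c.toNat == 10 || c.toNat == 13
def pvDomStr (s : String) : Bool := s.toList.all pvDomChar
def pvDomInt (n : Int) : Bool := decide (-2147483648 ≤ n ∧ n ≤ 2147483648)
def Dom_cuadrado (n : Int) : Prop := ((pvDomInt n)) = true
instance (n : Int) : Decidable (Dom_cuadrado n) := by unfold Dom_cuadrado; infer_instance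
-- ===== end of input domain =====

-- B builds every row directly from the fixed first row by a closed-form cut (two slices), instead of A's iterated rotation of the previous row; no running state between rows.

-- ===== PORT A =====
-- while i <= tam: p.append(i); i += 1
def primeraLoop (tam : Int) (p : List Int) (i : Int) : List Int :=
  if i ≤ tam then primeraLoop tam (p ++ [i]) (i + 1) else p
termination_by (tam + 1 - i).toNat
decreasing_by omega

def primera (tam : Int) : List Int := primeraLoop tam [] 1

-- return [lst[-1]] + lst[:-1]  (lst[-1] raises on []; A never calls rotar on an empty list)
def rotar (lst : List Int) : List Int :=
  (match PySem.List.pyGet? lst (-1) with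
   | some x => [x]
   | none => []) ++ PySem.List.slice lst none (some (-1))

-- while i <= n: p = rotar(p); res.append(p); i += 1
def cuadradoLoop (n : Int) (p : List Int) (res : List (List Int)) (i : Int) : List (List Int) :=
  if i ≤ n then cuadradoLoop n (rotar p) (res ++ [rotar p]) (i + 1) else res
termination_by (n + 1 - i).toNat
decreasing_by omega

def cuadrado (n : Int) : List (List Int) :=
  cuadradoLoop n (primera n) [primera n] 2

-- ===== PORT B =====
def cuadrado_alt (n : Int) : List (List Int) :=
  let primera := PySem.List.pyRange 1 (n + 1) 1
  (PySem.List.pyRange 2 (n + 1) 1).foldl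
    (fun res i =>
      let k := n - i + 1
      res ++ [PySem.List.slice primera (some k) none ++ PySem.List.slice primera none (some k)])
    [primera]

-- ===== PRECONDITION & SPEC =====
def Spec_cuadrado (n : Int) (out : List (List Int)) : Prop := out = cuadrado_alt n
instance (n : Int) (out : List (List Int)) : Decidable (Spec_cuadrado n out) := by unfold Spec_cuadrado; infer_instance

-- ===== CLAIM (what is proved, stated in full; the proofs are below) =====
def Claim_equal_cuadrado : Prop := ∀ (n : Int), Dom_cuadrado n → Spec_cuadrado n (cuadrado n)

-- ===== LEMMAS AND PROOFS =====

-- the closed-form row: B's row for loop index i is row n (i - 1)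
def row (n k : Int) : List Int :=
  (PySem.List.pyRange 0 n 1).map (fun j => PySem.Int.mod (j - k) n + 1)

theorem primeraLoop_eq (tam : Int) : ∀ (fuel : Nat) (i : Int), (tam + 1 - i).toNat ≤ fuel →
    ∀ p, primeraLoop tam p i = p ++ PySem.List.pyRange i (tam + 1) 1 := by
  intro fuel
  induction fuel with
  | zero =>
    intro i hf p
    rw [primeraLoop, if_neg (by omega), PySem.List.pyRange_one_eq_nil (by omega)]
    simp
  | succ fuel ih =>
    intro i hf p
    by_cases hi : i ≤ tam
    · rw [primeraLoop, if_pos hi, ih (i + 1) (by omega),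
        PySem.List.pyRange_one_cons (show i < tam + 1 by omega)]
      simp
    · rw [primeraLoop, if_neg hi, PySem.List.pyRange_one_eq_nil (by omega)]
      simp

theorem primera_eq_range (n : Int) : primera n = PySem.List.pyRange 1 (n + 1) 1 := by
  have := primeraLoop_eq n (n + 1 - 1).toNat 1 (le_refl _) []
  simpa [primera] using this

theorem mod_self_of_range (n j : Int) (h0 : 0 ≤ j) (hj : j < n) :
    PySem.Int.mod j n = j := by
  rw [PySem.Int.mod_eq_emod_of_pos (by omega)]
  exact Int.emod_eq_of_lt h0 hj

theorem range_eq_row_zero (n : Int) :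
    PySem.List.pyRange 1 (n + 1) 1 = row n 0 := by
  unfold row
  rw [PySem.List.pyRange_one, PySem.List.pyRange_one, List.map_map]
  have h : (n + 1 - 1).toNat = (n - 0).toNat := by omega
  rw [h]
  apply List.map_congr_left
  intro j hj
  have hj' : (j : Int) < n := by
    have := List.mem_range.mp hj; omega
  simp only [Function.comp_apply]
  rw [show (0 : Int) + (j : Int) - 0 = (j : Int) by ring,
    mod_self_of_range n j (by positivity) hj']
  ring

theorem rotar_row (n k : Int) (hn : 1 ≤ n) :
    rotar (row n k) = row n (k + 1) := by
  have hm : (n - 0).toNat = ((n - 0).toNat - 1) + 1 := by omega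
  set m : Nat := (n - 0).toNat - 1 with hmdef
  have hcast : ((m : Int) + 1) = n := by omega
  unfold row rotar
  rw [PySem.List.pyRange_one, hm]
  conv_lhs => rw [List.range_succ, List.map_append, List.map_append,
    List.map_singleton, List.map_singleton]
  rw [PySem.List.pyGet?_neg_one_append_singleton,
    PySem.List.slice_to_neg_one, List.dropLast_concat]
  conv_rhs => rw [List.range_succ_eq_map, List.map_cons, List.map_cons,
    List.map_map, List.map_map]
  show _ :: _ = _ :: _
  congr 1
  · congr 1
    have : (0 : Int) + ((m : Int)) - k = -(k + 1) + n * 1 := by omega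
    rw [this, show (0:Int) + (0:Nat) - (k+1) = -(k+1) by push_cast; ring]
    rw [PySem.Int.mod_eq_emod_of_pos (by omega), PySem.Int.mod_eq_emod_of_pos (by omega),
      Int.add_mul_emod_self_left]
  · simp only [List.map_map]
    apply List.map_congr_left
    intro j _
    simp only [Function.comp_apply]
    congr 2
    push_cast
    ring

theorem rowB_eq (n i : Int) (h2 : 2 ≤ i) (hi : i ≤ n) :
    PySem.List.slice (PySem.List.pyRange 1 (n + 1) 1) (some (n - i + 1)) none
      ++ PySem.List.slice (PySem.List.pyRange 1 (n + 1) 1) none (some (n - i + 1))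
      = row n (i - 1) := by
  have hk0 : (0 : Int) ≤ n - i + 1 := by omega
  rw [PySem.List.pyRange_one_append 1 (n - i + 2) (n + 1) (by omega) (by omega),
    PySem.List.slice_from _ hk0, PySem.List.slice_to _ hk0,
    List.drop_left' (by rw [PySem.List.length_pyRange_one]; omega),
    List.take_left' (by rw [PySem.List.length_pyRange_one]; omega)]
  apply List.ext_getElem
  · simp [row, PySem.List.pyRange_one]
    omega
  intro j hj1 hj2
  have hlen1 : (PySem.List.pyRange (n - i + 2) (n + 1) 1).length = (i - 1).toNat := by
    rw [PySem.List.length_pyRange_one]; omega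
  have hjn : (j : Int) < n := by
    rw [List.length_append, hlen1, PySem.List.length_pyRange_one] at hj1; omega
  simp only [row] at hj2 ⊢
  rw [List.getElem_map, PySem.List.getElem_pyRange_one,
    PySem.Int.mod_eq_emod_of_pos (show (0:Int) < n by omega)]
  by_cases hj : j < (i - 1).toNat
  · rw [List.getElem_append_left (by omega), PySem.List.getElem_pyRange_one]
    rw [show (0 : Int) + (j : Int) - (i - 1) = (j - i + 1 + n) + n * (-1) by ring,
      Int.add_mul_emod_self_left, Int.emod_eq_of_lt (by omega) (by omega)]
    omega
  · rw [List.getElem_append_right (by omega), PySem.List.getElem_pyRange_one]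
    rw [show (0 : Int) + (j : Int) - (i - 1) = (j : Int) - i + 1 by ring,
      Int.emod_eq_of_lt (by omega) (by omega)]
    rw [hlen1]
    omega

theorem cuadradoLoop_eq (n : Int) (hn : 1 ≤ n) : ∀ (fuel : Nat) (i : Int),
    (n + 1 - i).toNat ≤ fuel → 2 ≤ i → ∀ res,
    cuadradoLoop n (row n (i - 2)) res i
      = res ++ (PySem.List.pyRange i (n + 1) 1).map (fun t => row n (t - 1)) := by
  intro fuel
  induction fuel with
  | zero =>
    intro i hf _ res
    rw [cuadradoLoop, if_neg (by omega), PySem.List.pyRange_one_eq_nil (by omega)]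
    simp
  | succ fuel ih =>
    intro i hf h2 res
    by_cases hi : i ≤ n
    · rw [cuadradoLoop, if_pos hi, rotar_row n (i - 2) hn,
        show i - 2 + 1 = (i + 1) - 2 by ring,
        ih (i + 1) (by omega) (by omega),
        PySem.List.pyRange_one_cons (show i < n + 1 by omega), List.map_cons]
      simp [show (i + 1) - 2 = i - 1 by ring]
    · rw [cuadradoLoop, if_neg hi, PySem.List.pyRange_one_eq_nil (by omega)]
      simp

-- ===== VERDICT (by name: the statement is the Claim_ definition above) =====
theorem cuadrado_spec : Claim_equal_cuadrado := by
  intro n _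
  unfold Spec_cuadrado cuadrado cuadrado_alt
  rw [PySem.List.foldl_append_singleton_eq_map, primera_eq_range]
  by_cases hn : n ≤ 1
  · rw [cuadradoLoop, if_neg (by omega),
      PySem.List.pyRange_one_eq_nil (show n + 1 ≤ 2 by omega)]
    simp
  · have h1 : (1 : Int) ≤ n := by omega
    have hrow : PySem.List.pyRange 1 (n + 1) 1 = row n (2 - 2) := by
      simpa using range_eq_row_zero n
    conv_lhs => rw [hrow]
    rw [cuadradoLoop_eq n h1 (n + 1 - 2).toNat 2 (le_refl _) (by omega)]
    congr 1
    · rw [hrow]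
    apply List.map_congr_left
    intro t ht
    have := (PySem.List.mem_pyRange_one).mp ht
    exact (rowB_eq n t (by omega) (by omega)).symm
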